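-- pv_equiv track=rewrite | github.com/kaito4213/AI-2048-Game-Player | core/utils.py | check_end
-- ===== SOURCE A (Python) =====
-- def check_full(board):
--     """
--     Check if board is full
--     """
--     N = len(board)
--     for i in range(N):
--         for j in range(N):
--             if board[i][j] == '*':
--                 return False
--     return True
--
-- def check_end(board):
--     """
--     check if game is at the end state
--     """
--     N = len(board)
--
--     # first check if full, and if full, check no two adjacent elem is same
--     if not check_full(board):
--         return False
--
--     # check row
--     for i in range(N):
--         for j in range(1,N):
--             if board[i][j] == board[i][j-1]:
--                 return False
--
--     # check col
--     for i in range(N):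
--         for j in range(1,N):
--             if board[j][i] == board[j-1][i]:
--                 return False
--
--     return True
-- ===== SOURCE B (Python) =====
-- def check_end(board):
--     """
--     check if game is at the end state
--     """
--     n = len(board)
--     for i in range(n):
--         row = board[i][:n]
--         nxt = board[i + 1][:n] if i + 1 < n else []
--         for j in range(len(row)):
--             v = row[j]
--             if v == '*':
--                 return False
--             if j + 1 < len(row) and v == row[j + 1]:
--                 return False
--             if j < len(nxt) and v == nxt[j]:
--                 return False
--     return True
-- ===== Notes on version B (the rewrite author's own statement) =====
-- stated objective: alternative
-- what changed: Replaced A's three separate whole-board scans (fullness, then all row pairs, then all column pairs) by one fused pass over the n-by-n cells that checks each cell for '*' and against its right and down neighbours only; clipped rows keep B total on ragged input.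
import Mathlib
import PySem

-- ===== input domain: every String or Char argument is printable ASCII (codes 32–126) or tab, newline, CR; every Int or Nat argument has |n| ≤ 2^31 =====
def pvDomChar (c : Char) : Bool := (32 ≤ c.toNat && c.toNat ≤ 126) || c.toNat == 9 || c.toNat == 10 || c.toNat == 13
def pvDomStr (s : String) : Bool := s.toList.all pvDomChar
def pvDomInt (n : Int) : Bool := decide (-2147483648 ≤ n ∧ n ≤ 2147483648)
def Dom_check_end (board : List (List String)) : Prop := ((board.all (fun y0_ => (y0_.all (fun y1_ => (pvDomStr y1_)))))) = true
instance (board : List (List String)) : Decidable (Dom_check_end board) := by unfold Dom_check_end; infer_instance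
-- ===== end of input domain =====

-- B fuses A's three separate whole-board scans into one pass over the cells, checking each cell
-- for '*' and against its right and down neighbours only (objective: simpler).

-- ===== PORT A =====
-- board[i][j] is ported as getD (exact on Pre_, where every index taken is in range;
-- on boards with a row shorter than len(board) Python may raise IndexError — outside Pre_)
def check_full (board : List (List String)) : Bool :=
  let N := board.length
  !((List.range N).any fun i => (List.range N).any fun j =>
      ((board.getD i []).getD j "") == "*")

def check_end (board : List (List String)) : Bool :=
  let N := board.length
  if !check_full board then false
  else if (List.range N).any (fun i => (List.range' 1 (N - 1)).any fun j =>
      ((board.getD i []).getD j "") == ((board.getD i []).getD (j - 1) "")) then false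
  else if (List.range N).any (fun i => (List.range' 1 (N - 1)).any fun j =>
      ((board.getD j []).getD i "") == ((board.getD (j - 1) []).getD i "")) then false
  else true

-- ===== PORT B =====
-- the fused double loop with three early returns becomes one negated `any` of the
-- disjunction of the three per-cell conditions (same value: the first bad cell decides);
-- row[:n] is ported as List.take n (exact: n ≥ 0)
def check_end_alt (board : List (List String)) : Bool :=
  let n := board.length
  !((List.range n).any fun i =>
      let row := (board.getD i []).take n
      let nxt := if i + 1 < n then (board.getD (i + 1) []).take n else []
      (List.range row.length).any fun j =>
        let v := row.getD j ""
        (v == "*")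
        || (decide (j + 1 < row.length) && (v == row.getD (j + 1) ""))
        || (decide (j < nxt.length) && (v == nxt.getD j "")))

-- ===== PRECONDITION & SPEC =====
-- Pre_ is exactly where Python A returns normally: either every row has at least len(board)
-- entries, or A's first fullness scan meets a '*' before it meets a missing cell (EarlyStar);
-- everywhere else A raises IndexError.
def EarlyStar (board : List (List String)) : Prop :=
  ∃ i < board.length, (∀ i' < i, board.length ≤ (board.getD i' []).length) ∧
    "*" ∈ (board.getD i []).take board.length

def Pre_check_end (board : List (List String)) : Prop :=
  (∀ row ∈ board, board.length ≤ row.length) ∨ EarlyStar board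
instance (board : List (List String)) : Decidable (Pre_check_end board) := by
  unfold Pre_check_end EarlyStar; infer_instance

def pvWitness_check_end : List (List String) := [["2", "4"], ["4", "2"]]

def Spec_check_end (board : List (List String)) (out : Bool) : Prop := out = check_end_alt board
instance (board : List (List String)) (out : Bool) : Decidable (Spec_check_end board out) := by
  unfold Spec_check_end; infer_instance

-- ===== CLAIM (what is proved, stated in full; the proofs are below) =====
def Claim_equal_check_end : Prop := ∀ (board : List (List String)), Dom_check_end board → Pre_check_end board → Spec_check_end board (check_end board)

-- ===== LEMMAS AND PROOFS =====

-- the cell both ports read (Python's board[i][j] wherever it is in range)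
def cellD (board : List (List String)) (i j : Nat) : String :=
  (board.getD i []).getD j ""

-- number of cells of row i that B's clipped row row[:n] keeps
def clipLen (board : List (List String)) (i : Nat) : Nat :=
  min board.length (board.getD i []).length

-- the three "bad" configurations as A's index scans see them (over the N×N grid, N = len board)
def PStar (board : List (List String)) : Prop :=
  ∃ i < board.length, ∃ j < board.length, cellD board i j = "*"
def PRow (board : List (List String)) : Prop :=
  ∃ i < board.length, ∃ k, k + 1 < board.length ∧ cellD board i k = cellD board i (k + 1)
def PCol (board : List (List String)) : Prop :=
  ∃ k, k + 1 < board.length ∧ ∃ i < board.length, cellD board k i = cellD board (k + 1) i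

-- the three "bad" configurations as B's clipped scan sees them
def QStar (board : List (List String)) : Prop :=
  ∃ i < board.length, ∃ j < clipLen board i, cellD board i j = "*"
def QRow (board : List (List String)) : Prop :=
  ∃ i < board.length, ∃ j, j + 1 < clipLen board i ∧ cellD board i j = cellD board i (j + 1)
def QCol (board : List (List String)) : Prop :=
  ∃ i, i + 1 < board.length ∧ ∃ j, j < clipLen board i ∧ j < clipLen board (i + 1) ∧
    cellD board i j = cellD board (i + 1) j

theorem getD_take {α : Type} (l : List α) (n j : Nat) (d : α) (h : j < (l.take n).length) :
    (l.take n).getD j d = l.getD j d := by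
  have hl : (l.take n).length = min n l.length := l.length_take
  rw [List.getD_eq_getElem _ _ h, List.getD_eq_getElem _ _ (by omega), List.getElem_take]

theorem full_iff (board : List (List String)) :
    check_full board = true ↔ ¬ PStar board := by
  simp only [check_full, Bool.not_eq_true', ← Bool.not_eq_true]
  apply not_congr
  simp only [List.any_eq_true, List.mem_range, beq_iff_eq, PStar, cellD]

theorem rowA_iff (board : List (List String)) :
    ((List.range board.length).any fun i => (List.range' 1 (board.length - 1)).any fun j =>
      ((board.getD i []).getD j "") == ((board.getD i []).getD (j - 1) "")) = true
      ↔ PRow board := by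
  simp only [List.any_eq_true, List.mem_range, List.mem_range'_1, beq_iff_eq, PRow, cellD]
  constructor
  · rintro ⟨i, hi, j, ⟨hj1, hj2⟩, he⟩
    refine ⟨i, hi, j - 1, by omega, ?_⟩
    have hj : j - 1 + 1 = j := by omega
    rw [hj]
    exact he.symm
  · rintro ⟨i, hi, k, hk, he⟩
    refine ⟨i, hi, k + 1, ⟨by omega, by omega⟩, ?_⟩
    have hk1 : k + 1 - 1 = k := by omega
    rw [hk1]
    exact he.symm

theorem colA_iff (board : List (List String)) :
    ((List.range board.length).any fun i => (List.range' 1 (board.length - 1)).any fun j =>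
      ((board.getD j []).getD i "") == ((board.getD (j - 1) []).getD i "")) = true
      ↔ PCol board := by
  simp only [List.any_eq_true, List.mem_range, List.mem_range'_1, beq_iff_eq, PCol, cellD]
  constructor
  · rintro ⟨i, hi, j, ⟨hj1, hj2⟩, he⟩
    refine ⟨j - 1, by omega, i, hi, ?_⟩
    have hj : j - 1 + 1 = j := by omega
    rw [hj]
    exact he.symm
  · rintro ⟨k, hk, i, hi, he⟩
    refine ⟨i, hi, k + 1, ⟨by omega, by omega⟩, ?_⟩
    have hk1 : k + 1 - 1 = k := by omega
    rw [hk1]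
    exact he.symm

theorem a_iff (board : List (List String)) :
    check_end board = true ↔ ¬ PStar board ∧ ¬ PRow board ∧ ¬ PCol board := by
  simp only [check_end]
  cases hb1 : check_full board
  · have hp1 : PStar board :=
      Classical.byContradiction fun hn => by
        rw [(full_iff board).mpr hn] at hb1; cases hb1
    simp [hp1]
  · have hnp1 : ¬ PStar board := (full_iff board).mp hb1
    cases hb2 : ((List.range board.length).any fun i =>
        (List.range' 1 (board.length - 1)).any fun j =>
        ((board.getD i []).getD j "") == ((board.getD i []).getD (j - 1) ""))
    · have hnp2 : ¬ PRow board := fun hp => by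
        rw [(rowA_iff board).mpr hp] at hb2; cases hb2
      cases hb3 : ((List.range board.length).any fun i =>
          (List.range' 1 (board.length - 1)).any fun j =>
          ((board.getD j []).getD i "") == ((board.getD (j - 1) []).getD i ""))
      · have hnp3 : ¬ PCol board := fun hp => by
          rw [(colA_iff board).mpr hp] at hb3; cases hb3
        simp [hnp1, hnp2, hnp3]
      · have hp3 : PCol board := (colA_iff board).mp hb3
        simp [hp3]
    · have hp2 : PRow board := (rowA_iff board).mp hb2
      simp [hp2]

theorem b_iff (board : List (List String)) :
    check_end_alt board = true ↔ ¬ QStar board ∧ ¬ QRow board ∧ ¬ QCol board := by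
  simp only [check_end_alt, Bool.not_eq_true', ← Bool.not_eq_true]
  rw [show (¬ QStar board ∧ ¬ QRow board ∧ ¬ QCol board)
      ↔ ¬ (QStar board ∨ QRow board ∨ QCol board) by tauto]
  apply not_congr
  simp only [List.any_eq_true, List.mem_range, Bool.or_eq_true, Bool.and_eq_true,
    decide_eq_true_eq, beq_iff_eq]
  have hcl : ∀ i, ((board.getD i []).take board.length).length = clipLen board i := by
    intro i
    rw [List.length_take, clipLen]
  constructor
  · rintro ⟨i, hi, j, hj, ((hs | ⟨hj1, he⟩) | ⟨hjn, he⟩)⟩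
    · refine Or.inl ⟨i, hi, j, by rw [← hcl]; exact hj, ?_⟩
      rw [cellD, ← getD_take _ board.length j _ hj]
      exact hs
    · refine Or.inr (Or.inl ⟨i, hi, j, by rw [← hcl]; exact hj1, ?_⟩)
      rw [cellD, cellD, ← getD_take _ board.length j _ hj, ← getD_take _ board.length (j+1) _ hj1]
      exact he
    · by_cases hin : i + 1 < board.length
      · rw [if_pos hin] at hjn he
        refine Or.inr (Or.inr ⟨i, hin, j, by rw [← hcl]; exact hj, by rw [← hcl]; exact hjn, ?_⟩)
        rw [cellD, cellD, ← getD_take _ board.length j _ hj, ← getD_take _ board.length j _ hjn]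
        exact he
      · rw [if_neg hin] at hjn
        simp at hjn
  · rintro (⟨i, hi, j, hj, hs⟩ | ⟨i, hi, j, hj1, he⟩ | ⟨i, hin, j, hj, hjn, he⟩)
    · refine ⟨i, hi, j, by rw [hcl]; exact hj, Or.inl (Or.inl ?_)⟩
      rw [getD_take _ board.length j _ (by rw [hcl]; exact hj)]
      exact hs
    · refine ⟨i, hi, j, by rw [hcl]; omega, Or.inl (Or.inr ⟨by rw [hcl]; exact hj1, ?_⟩)⟩
      rw [getD_take _ board.length j _ (by rw [hcl]; omega),
        getD_take _ board.length (j+1) _ (by rw [hcl]; exact hj1)]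
      exact he
    · refine ⟨i, by omega, j, by rw [hcl]; exact hj, Or.inr ⟨?_, ?_⟩⟩
      · rw [if_pos hin, hcl]
        exact hjn
      · rw [if_pos hin,
          getD_take _ board.length j _ (by rw [hcl]; exact hj),
          getD_take _ board.length j _ (by rw [hcl]; exact hjn)]
        exact he

-- under "every row has at least N entries" the clipped grid is exactly the N×N grid
theorem clipLen_eq (board : List (List String))
    (h : ∀ row ∈ board, board.length ≤ row.length) {i : Nat} (hi : i < board.length) :
    clipLen board i = board.length := by
  have hrow : board.getD i [] = board[i] := List.getD_eq_getElem board [] hi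
  have hlen : board.length ≤ board[i].length := h _ (board.getElem_mem hi)
  rw [clipLen, hrow]
  omega

-- EarlyStar boards carry a '*' inside the clipped grid, hence inside the N×N scan of A
theorem earlyStar_cell (board : List (List String)) (hes : EarlyStar board) :
    (∃ i < board.length, ∃ j < clipLen board i, cellD board i j = "*") := by
  obtain ⟨i, hi, -, hmem⟩ := hes
  rw [List.mem_iff_getElem] at hmem
  obtain ⟨j, hj, hcell⟩ := hmem
  have hl : ((board.getD i []).take board.length).length =
      min board.length (board.getD i []).length := (board.getD i []).length_take
  refine ⟨i, hi, j, by rw [clipLen]; omega, ?_⟩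
  rw [cellD, ← getD_take _ board.length j _ hj, List.getD_eq_getElem _ _ hj]
  exact hcell

-- ===== VERDICT (by name: the statement is the Claim_ definition above) =====
theorem check_end_spec : Claim_equal_check_end := by
  intro board _ hpre
  unfold Spec_check_end
  rcases hpre with hfull | hes
  · have hS : PStar board ↔ QStar board := by
      unfold PStar QStar
      constructor
      · rintro ⟨i, hi, j, hj, he⟩
        exact ⟨i, hi, j, by rw [clipLen_eq board hfull hi]; exact hj, he⟩
      · rintro ⟨i, hi, j, hj, he⟩
        exact ⟨i, hi, j, by rw [← clipLen_eq board hfull hi]; exact hj, he⟩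
    have hH : PRow board ↔ QRow board := by
      unfold PRow QRow
      constructor
      · rintro ⟨i, hi, k, hk, he⟩
        exact ⟨i, hi, k, by rw [clipLen_eq board hfull hi]; exact hk, he⟩
      · rintro ⟨i, hi, k, hk, he⟩
        exact ⟨i, hi, k, by rw [← clipLen_eq board hfull hi]; exact hk, he⟩
    have hV : PCol board ↔ QCol board := by
      unfold PCol QCol
      constructor
      · rintro ⟨k, hk, i, hi, he⟩
        refine ⟨k, hk, i, ?_, ?_, he⟩
        · rw [clipLen_eq board hfull (by omega)]; exact hi
        · rw [clipLen_eq board hfull hk]; exact hi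
      · rintro ⟨k, hk, i, hi, _, he⟩
        refine ⟨k, hk, i, ?_, he⟩
        have := clipLen_eq board hfull (show k < board.length by omega)
        omega
    rw [Bool.eq_iff_iff, a_iff board, b_iff board, hS, hH, hV]
  · obtain ⟨i, hi, j, hj, he⟩ := earlyStar_cell board hes
    have hQ : QStar board := ⟨i, hi, j, hj, he⟩
    have hP : PStar board := ⟨i, hi, j, by unfold clipLen at hj; omega, he⟩
    have hA : check_end board = false := by
      cases hA : check_end board
      · rfl
      · exact absurd hP ((a_iff board).mp hA).1
    have hB : check_end_alt board = false := by
      cases hB : check_end_alt board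
      · rfl
      · exact absurd hQ ((b_iff board).mp hB).1
    rw [hA, hB]
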